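-- pv_equiv track=rewrite | github.com/homebrew9/leetcode_solutions | algorithms/easy/transform_array_by_parity_v1.py | transformArray_1
-- ===== SOURCE A (Python) =====
-- from typing import List
--
-- def transformArray_1(nums: List[int]) -> List[int]:
--     # Using two-pointer approach, and avoiding a sort
--     N = len(nums)
--     res = [None] * N
--     left, right = 0, N - 1
--     for i in range(N):
--         if nums[i] % 2 == 0:
--             res[left] = 0
--             left += 1
--         else:
--             res[right] = 1
--             right -= 1
--     return res
-- ===== SOURCE B (Python) =====
-- from typing import List
--
-- def transformArray_1(nums: List[int]) -> List[int]:
--     # Count evens, then build the answer directly: all zeros then all ones.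
--     evens = sum(1 for x in nums if x % 2 == 0)
--     return [0] * evens + [1] * (len(nums) - evens)
-- ===== Notes on version B (the rewrite author's own statement) =====
-- stated objective: simpler
-- what changed: Replaced the two-pointer positional placement into a preallocated array by a single count of the even elements followed by direct construction of that many zeros concatenated with ones for the rest.
import Mathlib
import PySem

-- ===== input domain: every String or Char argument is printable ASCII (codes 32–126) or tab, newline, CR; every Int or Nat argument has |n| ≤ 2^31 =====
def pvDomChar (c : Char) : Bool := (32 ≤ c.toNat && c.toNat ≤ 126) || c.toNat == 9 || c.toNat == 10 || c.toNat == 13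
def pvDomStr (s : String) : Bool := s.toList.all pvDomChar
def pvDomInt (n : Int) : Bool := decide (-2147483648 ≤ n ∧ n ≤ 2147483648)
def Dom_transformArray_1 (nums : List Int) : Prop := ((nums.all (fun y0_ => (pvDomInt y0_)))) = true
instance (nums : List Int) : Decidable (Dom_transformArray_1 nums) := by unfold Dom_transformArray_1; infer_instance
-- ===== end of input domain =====

-- ===== PORT A =====
-- B counts evens once and builds [0]*evens ++ [1]*odds directly instead of A's two-pointer placement (simpler).
-- A's loop: res[left]=0 / res[right]=1 over nums; res starts as [None]*N but every slot is written, so the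
-- final map (Option.getD 0) only removes the Option wrapper (proved: no none survives).
def transformArray_1_loop (res : List (Option Int)) (left right : Int) : List Int → List (Option Int)
  | [] => res
  | x :: xs =>
      if PySem.Int.mod x 2 == 0 then
        transformArray_1_loop (res.set left.toNat (some 0)) (left + 1) right xs
      else
        transformArray_1_loop (res.set right.toNat (some 1)) left (right - 1) xs

def transformArray_1 (nums : List Int) : List Int :=
  (transformArray_1_loop (List.replicate nums.length none) 0 ((nums.length : Int) - 1) nums).map
    (fun o => o.getD 0)

-- ===== PORT B =====
def transformArray_1_alt (nums : List Int) : List Int :=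
  let evens := nums.countP (fun x => PySem.Int.mod x 2 == 0)
  List.replicate evens 0 ++ List.replicate (nums.length - evens) 1
-- ===== PRECONDITION & SPEC =====
def Spec_transformArray_1 (nums : List Int) (out : List Int) : Prop := out = transformArray_1_alt nums
instance (nums : List Int) (out : List Int) : Decidable (Spec_transformArray_1 nums out) := by unfold Spec_transformArray_1; infer_instance

-- ===== CLAIM (what is proved, stated in full; the proofs are below) =====
def Claim_equal_transformArray_1 : Prop := ∀ (nums : List Int), Dom_transformArray_1 nums → Spec_transformArray_1 nums (transformArray_1 nums)

-- ===== LEMMAS AND PROOFS =====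

-- ===== VERDICT (by name: the statement is the Claim_ definition above) =====
lemma repl_cons {α : Type} (k : Nat) (x : α) (l : List α) :
    List.replicate k x ++ x :: l = x :: (List.replicate k x ++ l) := by
  induction k with
  | zero => simp
  | succ n ih => simp [List.replicate_succ, ih]

lemma countP_not_add (p : Int → Bool) (l : List Int) :
    l.countP (fun x => !p x) + l.countP p = l.length := by
  induction l with
  | nil => simp
  | cons x xs ih => by_cases h : p x <;> simp [h] <;> omega

lemma set_mid_left (a m b : Nat) :
    (List.replicate a (some (0:Int)) ++ List.replicate (m+1) (none : Option Int) ++ List.replicate b (some 1)).set a (some 0)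
      = List.replicate (a+1) (some 0) ++ List.replicate m (none : Option Int) ++ List.replicate b (some 1) := by
  induction a with
  | zero => simp [List.replicate_succ]
  | succ k ih => simp [List.replicate_succ, repl_cons]

lemma set_mid_right (a m b : Nat) :
    (List.replicate a (some (0:Int)) ++ List.replicate (m+1) (none : Option Int) ++ List.replicate b (some 1)).set (a+m) (some 1)
      = List.replicate a (some 0) ++ List.replicate m (none : Option Int) ++ List.replicate (b+1) (some 1) := by
  induction a with
  | zero =>
      simp only [List.replicate, List.nil_append]
      induction m with
      | zero => simp
      | succ k ihm =>
          simp only [List.replicate_succ, List.cons_append, Nat.zero_add, List.set_cons_succ]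
          simpa using ihm
  | succ k ih => simpa [List.replicate_succ, Nat.succ_add] using ih

lemma loop_inv (xs : List Int) : ∀ (a b : Nat),
    transformArray_1_loop
      (List.replicate a (some 0) ++ List.replicate xs.length (none : Option Int) ++ List.replicate b (some 1))
      (a : Int) ((a : Int) + xs.length - 1) xs
    = List.replicate (a + xs.countP (fun x => PySem.Int.mod x 2 == 0)) (some 0)
        ++ List.replicate (xs.countP (fun x => !(PySem.Int.mod x 2 == 0)) + b) (some 1) := by
  induction xs with
  | nil => intro a b; simp [transformArray_1_loop]
  | cons x xs ih =>
      intro a b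
      by_cases h : PySem.Int.mod x 2 == 0
      · have hset := set_mid_left a xs.length b
        have : ((a : Int)).toNat = a := by simp
        simp only [transformArray_1_loop, if_pos, List.length_cons, this, hset,
          List.countP_cons, h, Bool.not_true]
        have := ih (a+1) b
        have harith : ((a:Int) + 1) = ((a+1 : Nat) : Int) := by push_cast; ring
        have harith2 : (a : Int) + (xs.length + 1 : Nat) - 1 = ((a+1 : Nat) : Int) + xs.length - 1 := by
          push_cast; ring
        rw [harith2, harith, this]
        simp
        omega
      · have hidx : ((a : Int) + (xs.length + 1 : Nat) - 1).toNat = a + xs.length := by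
          push_cast; omega
        have hset := set_mid_right a xs.length b
        simp only [transformArray_1_loop, h, if_neg, List.length_cons, hidx, hset,
          List.countP_cons]
        have harith : (a : Int) + (xs.length + 1 : Nat) - 1 - 1 = (a : Int) + xs.length - 1 := by
          push_cast; ring
        rw [harith, ih a (b+1)]
        simp
        omega

lemma map_getD (n m : Nat) :
    (List.replicate n (some (0:Int)) ++ List.replicate m (some (1:Int))).map (fun o => o.getD 0)
      = List.replicate n 0 ++ List.replicate m 1 := by
  simp

theorem transformArray_1_spec : Claim_equal_transformArray_1 := by
  intro nums _
  unfold Spec_transformArray_1 transformArray_1 transformArray_1_alt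
  have h := loop_inv nums 0 0
  simp only [List.replicate_zero, List.nil_append, List.append_nil, Nat.zero_add, Nat.add_zero,
    Int.natCast_zero, Int.zero_add] at h
  rw [h, map_getD]
  have hcount : nums.countP (fun x => !(PySem.Int.mod x 2 == 0))
      = nums.length - nums.countP (fun x => PySem.Int.mod x 2 == 0) := by
    have := countP_not_add (fun x => PySem.Int.mod x 2 == 0) nums
    omega
  rw [hcount]
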